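-- pv_equiv track=rewrite | github.com/MrBrantCode/unitest_baseline | mut_generate/mist_train_cf/cf_66733/solution.py | entrance
-- ===== SOURCE A (Python) =====
-- def entrance(string1, string2):
--     string1, string2 = string1.strip(), string2.strip()
--
--     # Empty strings or strings containing only spaces are regarded as lowest possible value
--     if not string1 and not string2:
--         return "The strings are equal."
--     elif not string1:
--         return "String 2 comes first alphabetically."
--     elif not string2:
--         return "String 1 comes first alphabetically."
--
--     # Compare length of both strings
--     if len(string1) < len(string2):
--         return "String 1 comes first alphabetically."
--     elif len(string1) > len(string2):
--         return "String 2 comes first alphabetically."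
--     else:
--         # Compare string letters
--         for c1, c2 in zip(string1.lower(), string2.lower()):
--             if ord(c1) < ord(c2):
--                 return "String 1 comes first alphabetically."
--             elif ord(c1) > ord(c2):
--                 return "String 2 comes first alphabetically."
--
--     return "The strings are equal."
-- ===== SOURCE B (Python) =====
-- def entrance(string1, string2):
--     string1, string2 = string1.strip(), string2.strip()
--
--     # Empty strings or strings containing only spaces are regarded as lowest possible value
--     if not string1 and not string2:
--         return "The strings are equal."
--     if not string1:
--         return "String 2 comes first alphabetically."
--     if not string2:
--         return "String 1 comes first alphabetically."
--
--     # Arithmetical formulation: encode each string as a single natural number with a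
--     # leading 1 "digit" in base 1114112 (> any code point) over its lowercased code
--     # points.  The leading digit makes a longer string always encode to a larger
--     # number, and for equal lengths positional weights reproduce the left-to-right
--     # character comparison, so one integer comparison realises the whole order.
--     def key(s):
--         v = 1
--         for c in s.lower():
--             v = v * 1114112 + ord(c)
--         return v
--
--     k1, k2 = key(string1), key(string2)
--     if k1 < k2:
--         return "String 1 comes first alphabetically."
--     if k1 > k2:
--         return "String 2 comes first alphabetically."
--     return "The strings are equal."
-- ===== Notes on version B (the rewrite author's own statement) =====
-- stated objective: alternative
-- what changed: Instead of branching on lengths and then walking the two strings char-by-char, B encodes each string as one big integer (leading 1 digit, base 1114112, lowercased code points) so that a single numeric comparison decides the whole shortlex order; no length test and no paired character loop remain.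
import Mathlib
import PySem

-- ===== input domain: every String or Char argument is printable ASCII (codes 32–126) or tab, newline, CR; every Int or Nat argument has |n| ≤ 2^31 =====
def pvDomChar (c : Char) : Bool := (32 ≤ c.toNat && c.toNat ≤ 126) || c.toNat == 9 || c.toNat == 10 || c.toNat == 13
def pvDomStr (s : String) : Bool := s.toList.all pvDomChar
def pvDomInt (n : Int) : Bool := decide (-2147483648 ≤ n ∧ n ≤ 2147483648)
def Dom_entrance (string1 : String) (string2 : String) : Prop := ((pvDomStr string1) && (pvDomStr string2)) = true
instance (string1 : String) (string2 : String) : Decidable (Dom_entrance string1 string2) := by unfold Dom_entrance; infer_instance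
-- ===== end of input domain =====

-- ===== PORT A =====
-- B replaces A's length branching and paired char-by-char ord loop by encoding each
-- string as one big integer (leading 1 digit, base 1114112, lowercased code points)
-- and doing a single numeric comparison (objective: alternative, not faster).
def entranceLoop : List Char → List Char → String
  | c1 :: t1, c2 :: t2 =>
      if c1.toNat < c2.toNat then "String 1 comes first alphabetically."
      else if c1.toNat > c2.toNat then "String 2 comes first alphabetically."
      else entranceLoop t1 t2
  | _, _ => "The strings are equal."

def entrance (string1 : String) (string2 : String) : String :=
  let s1 := PySem.Str.strip string1
  let s2 := PySem.Str.strip string2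
  if s1 = "" ∧ s2 = "" then "The strings are equal."
  else if s1 = "" then "String 2 comes first alphabetically."
  else if s2 = "" then "String 1 comes first alphabetically."
  else if PySem.Str.len s1 < PySem.Str.len s2 then "String 1 comes first alphabetically."
  else if PySem.Str.len s1 > PySem.Str.len s2 then "String 2 comes first alphabetically."
  else entranceLoop (PySem.Str.lower s1).toList (PySem.Str.lower s2).toList

-- ===== PORT B =====
-- v = 1; for c in s.lower(): v = v * 1114112 + ord(c)
def pvStep (v : Nat) (c : Char) : Nat := v * 1114112 + c.toNat

def pvKey (s : String) : Nat := (PySem.Str.lower s).toList.foldl pvStep 1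

def entrance_alt (string1 : String) (string2 : String) : String :=
  let s1 := PySem.Str.strip string1
  let s2 := PySem.Str.strip string2
  if s1 = "" ∧ s2 = "" then "The strings are equal."
  else if s1 = "" then "String 2 comes first alphabetically."
  else if s2 = "" then "String 1 comes first alphabetically."
  else
    let k1 := pvKey s1
    let k2 := pvKey s2
    if k1 < k2 then "String 1 comes first alphabetically."
    else if k1 > k2 then "String 2 comes first alphabetically."
    else "The strings are equal."

-- ===== PRECONDITION & SPEC =====
def Spec_entrance (string1 : String) (string2 : String) (out : String) : Prop := out = entrance_alt string1 string2
instance (string1 : String) (string2 : String) (out : String) : Decidable (Spec_entrance string1 string2 out) := by unfold Spec_entrance; infer_instance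

-- ===== CLAIM (what is proved, stated in full; the proofs are below) =====
def Claim_equal_entrance : Prop := ∀ (string1 : String) (string2 : String), Dom_entrance string1 string2 → Spec_entrance string1 string2 (entrance string1 string2)

-- ===== LEMMAS AND PROOFS =====
theorem pvChar_lt_base (c : Char) : c.toNat < 1114112 := by
  have h := c.valid
  simp only [Char.toNat]
  rcases h with h | h <;> omega

theorem pvFoldl_shift (l : List Char) (a : Nat) :
    l.foldl pvStep a = a * 1114112 ^ l.length + l.foldl pvStep 0 := by
  induction l generalizing a with
  | nil => simp
  | cons c t ih =>
    show t.foldl pvStep (pvStep a c) = a * 1114112 ^ (c :: t).length + (c :: t).foldl pvStep 0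
    have h1 : (c :: t).foldl pvStep 0 = c.toNat * 1114112 ^ t.length + t.foldl pvStep 0 := by
      show t.foldl pvStep (pvStep 0 c) = _
      rw [ih (pvStep 0 c)]
      simp [pvStep]
    rw [ih (pvStep a c), h1]
    simp only [pvStep, List.length_cons]
    ring

theorem pvVal_lt (l : List Char) : l.foldl pvStep 0 < 1114112 ^ l.length := by
  induction l with
  | nil => simp
  | cons c t ih =>
    have hc := pvChar_lt_base c
    have h1 : (c :: t).foldl pvStep 0 = c.toNat * 1114112 ^ t.length + t.foldl pvStep 0 := by
      show t.foldl pvStep (pvStep 0 c) = _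
      rw [pvFoldl_shift t (pvStep 0 c)]
      simp [pvStep]
    rw [h1]
    calc c.toNat * 1114112 ^ t.length + t.foldl pvStep 0
        < c.toNat * 1114112 ^ t.length + 1114112 ^ t.length := by omega
      _ = (c.toNat + 1) * 1114112 ^ t.length := by ring
      _ ≤ 1114112 * 1114112 ^ t.length := Nat.mul_le_mul_right _ (by omega)
      _ = 1114112 ^ (c :: t).length := by rw [List.length_cons]; ring

theorem pvKeyList_lb (l : List Char) : 1114112 ^ l.length ≤ l.foldl pvStep 1 := by
  rw [pvFoldl_shift l 1]; omega

theorem pvKeyList_ub (l : List Char) : l.foldl pvStep 1 < 1114112 ^ (l.length + 1) := by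
  rw [pvFoldl_shift l 1]
  have h1 := pvVal_lt l
  have h2 : 2 * 1114112 ^ l.length ≤ 1114112 * 1114112 ^ l.length :=
    Nat.mul_le_mul_right _ (by omega)
  have h3 : 1114112 * 1114112 ^ l.length = 1114112 ^ (l.length + 1) := by ring
  omega

theorem pvKey_lt_of_len_lt (x y : List Char) (h : x.length < y.length) :
    x.foldl pvStep 1 < y.foldl pvStep 1 := by
  calc x.foldl pvStep 1 < 1114112 ^ (x.length + 1) := pvKeyList_ub x
    _ ≤ 1114112 ^ y.length := Nat.pow_le_pow_right (by omega) (by omega)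
    _ ≤ y.foldl pvStep 1 := pvKeyList_lb y

theorem pvLoop_eq_val (x y : List Char) (h : x.length = y.length) :
    entranceLoop x y =
      if x.foldl pvStep 0 < y.foldl pvStep 0 then "String 1 comes first alphabetically."
      else if y.foldl pvStep 0 < x.foldl pvStep 0 then "String 2 comes first alphabetically."
      else "The strings are equal." := by
  induction x generalizing y with
  | nil =>
    cases y with
    | nil => simp [entranceLoop]
    | cons b u => simp at h
  | cons a t ih =>
    cases y with
    | nil => simp at h
    | cons b u =>
      simp only [List.length_cons, Nat.add_right_cancel_iff] at h
      have hx : (a :: t).foldl pvStep 0 = a.toNat * 1114112 ^ t.length + t.foldl pvStep 0 := by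
        show t.foldl pvStep (pvStep 0 a) = _
        rw [pvFoldl_shift t (pvStep 0 a)]; simp [pvStep]
      have hy : (b :: u).foldl pvStep 0 = b.toNat * 1114112 ^ t.length + u.foldl pvStep 0 := by
        show u.foldl pvStep (pvStep 0 b) = _
        rw [pvFoldl_shift u (pvStep 0 b)]; simp [pvStep, h]
      have hvt := pvVal_lt t
      have hvu := pvVal_lt u
      rw [← h] at hvu
      rcases Nat.lt_trichotomy a.toNat b.toNat with hlt | heq | hgt
      · have hk : (a :: t).foldl pvStep 0 < (b :: u).foldl pvStep 0 := by
          rw [hx, hy]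
          calc a.toNat * 1114112 ^ t.length + t.foldl pvStep 0
              < (a.toNat + 1) * 1114112 ^ t.length := by
                have := Nat.one_mul (1114112 ^ t.length)
                calc a.toNat * 1114112 ^ t.length + t.foldl pvStep 0
                    < a.toNat * 1114112 ^ t.length + 1114112 ^ t.length := by omega
                  _ = (a.toNat + 1) * 1114112 ^ t.length := by ring
            _ ≤ b.toNat * 1114112 ^ t.length := Nat.mul_le_mul_right _ (by omega)
            _ ≤ b.toNat * 1114112 ^ t.length + u.foldl pvStep 0 := Nat.le_add_right _ _
        simp only [entranceLoop]
        rw [if_pos hlt, if_pos hk]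
      · have h0 : ¬ a.toNat < b.toNat := by omega
        have h0' : ¬ a.toNat > b.toNat := by omega
        have hiff : ((a :: t).foldl pvStep 0 < (b :: u).foldl pvStep 0)
            ↔ (t.foldl pvStep 0 < u.foldl pvStep 0) := by
          rw [hx, hy, heq]; omega
        have hiff' : ((b :: u).foldl pvStep 0 < (a :: t).foldl pvStep 0)
            ↔ (u.foldl pvStep 0 < t.foldl pvStep 0) := by
          rw [hx, hy, heq]; omega
        rw [entranceLoop]
        simp only [h0, h0', if_false]
        rw [ih u h]
        by_cases h1 : t.foldl pvStep 0 < u.foldl pvStep 0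
        · rw [if_pos h1, if_pos (hiff.mpr h1)]
        · rw [if_neg h1, if_neg (fun hc => h1 (hiff.mp hc))]
          by_cases h2 : u.foldl pvStep 0 < t.foldl pvStep 0
          · rw [if_pos h2, if_pos (hiff'.mpr h2)]
          · rw [if_neg h2, if_neg (fun hc => h2 (hiff'.mp hc))]
      · have hk : (b :: u).foldl pvStep 0 < (a :: t).foldl pvStep 0 := by
          rw [hx, hy]
          calc b.toNat * 1114112 ^ t.length + u.foldl pvStep 0
              < b.toNat * 1114112 ^ t.length + 1114112 ^ t.length := by omega
            _ = (b.toNat + 1) * 1114112 ^ t.length := by ring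
            _ ≤ a.toNat * 1114112 ^ t.length := Nat.mul_le_mul_right _ (by omega)
            _ ≤ a.toNat * 1114112 ^ t.length + t.foldl pvStep 0 := Nat.le_add_right _ _
        have hnk : ¬ (a :: t).foldl pvStep 0 < (b :: u).foldl pvStep 0 := by omega
        have h0 : ¬ a.toNat < b.toNat := by omega
        simp only [entranceLoop]
        rw [if_neg h0, if_pos hgt, if_neg hnk, if_pos hk]

theorem pvLowerLen (s : String) : (PySem.Str.lower s).toList.length = s.toList.length := by
  rw [PySem.Str.toList_lower]
  simp [PySem.Chars.lower]

theorem pvStrLen_eq_toList (s : String) : PySem.Str.len s = (s.toList.length : Int) := by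
  simp [PySem.Str.len]

-- ===== VERDICT (by name: the statement is the Claim_ definition above) =====
theorem entrance_spec : Claim_equal_entrance := by
  intro string1 string2 _
  simp only [Spec_entrance, entrance, entrance_alt]
  set s1 := PySem.Str.strip string1
  set s2 := PySem.Str.strip string2
  by_cases he : s1 = "" ∧ s2 = ""
  · rw [if_pos he, if_pos he]
  · rw [if_neg he, if_neg he]
    by_cases h1 : s1 = ""
    · rw [if_pos h1, if_pos h1]
    · rw [if_neg h1, if_neg h1]
      by_cases h2 : s2 = ""
      · rw [if_pos h2, if_pos h2]
      · rw [if_neg h2, if_neg h2]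
        have hl1 : PySem.Str.len s1 = ((PySem.Str.lower s1).toList.length : Int) := by
          rw [pvStrLen_eq_toList, pvLowerLen]
        have hl2 : PySem.Str.len s2 = ((PySem.Str.lower s2).toList.length : Int) := by
          rw [pvStrLen_eq_toList, pvLowerLen]
        set x := (PySem.Str.lower s1).toList
        set y := (PySem.Str.lower s2).toList
        rcases lt_trichotomy (PySem.Str.len s1) (PySem.Str.len s2) with hlt | heq | hgt
        · have hn : x.length < y.length := by rw [hl1, hl2] at hlt; exact_mod_cast hlt
          have hk : pvKey s1 < pvKey s2 := pvKey_lt_of_len_lt x y hn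
          rw [if_pos hlt, if_pos hk]
        · have hn : x.length = y.length := by rw [hl1, hl2] at heq; exact_mod_cast heq
          have hnlt : ¬ PySem.Str.len s1 < PySem.Str.len s2 := by omega
          have hngt : ¬ PySem.Str.len s1 > PySem.Str.len s2 := by omega
          have hkx : pvKey s1 = 1114112 ^ x.length + x.foldl pvStep 0 := by
            show x.foldl pvStep 1 = _
            rw [pvFoldl_shift x 1]; ring_nf
          have hky : pvKey s2 = 1114112 ^ x.length + y.foldl pvStep 0 := by
            show y.foldl pvStep 1 = _
            rw [pvFoldl_shift y 1, hn]; ring_nf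
          have hiff : (pvKey s1 < pvKey s2) ↔ (x.foldl pvStep 0 < y.foldl pvStep 0) := by
            rw [hkx, hky]; omega
          have hiff' : (pvKey s2 < pvKey s1) ↔ (y.foldl pvStep 0 < x.foldl pvStep 0) := by
            rw [hkx, hky]; omega
          rw [if_neg hnlt, if_neg hngt, pvLoop_eq_val x y hn]
          by_cases ha : x.foldl pvStep 0 < y.foldl pvStep 0
          · rw [if_pos ha, if_pos (hiff.mpr ha)]
          · rw [if_neg ha, if_neg (fun hc => ha (hiff.mp hc))]
            by_cases hb : y.foldl pvStep 0 < x.foldl pvStep 0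
            · rw [if_pos hb, if_pos (hiff'.mpr hb)]
            · rw [if_neg hb, if_neg (fun hc => hb (hiff'.mp hc))]
        · have hn : y.length < x.length := by rw [hl1, hl2] at hgt; exact_mod_cast hgt
          have hk : pvKey s2 < pvKey s1 := pvKey_lt_of_len_lt y x hn
          have hnlt : ¬ PySem.Str.len s1 < PySem.Str.len s2 := by omega
          have hnk : ¬ pvKey s1 < pvKey s2 := by omega
          rw [if_neg hnlt, if_pos hgt, if_neg hnk, if_pos hk]
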